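-- pv_equiv track=rewrite | github.com/JureRot/adventofcode | 2015/2015_24.py | make_sspm
-- ===== SOURCE A (Python) =====
-- def make_sspm(set, t): #makes a matrix. if last last cells is True we have at least one subset that sums to t
--
-- 	arr = [[False  if i!=0 else True for i in range(t+1)] for i in range(len(set))] #makes 2d array of t+1 columns, and len(set) rows
-- 	arr.insert(0, [False if i!=0 else True for i in range(t+1)])
--
-- 	#this is suset sum problem solving algorithm
-- 	for i in range(1, len(arr)): #for each row starting at 1 (we have header row)
-- 		for j in range(1, len(arr[i])): #for each column starting at 1 (we have 0-th sum column)
-- 			if (j-set[i-1] >= 0): #if not outside borders (number in set not bigger than the currently wanted sum)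
-- 				arr[i][j] = arr[i-1][j] or arr[i-1][j - set[i-1]]
-- 			else: #incudes those who would be outside borders and sets them correctly (only regarding the cell above)
-- 				arr[i][j] = arr[i-1][j]
--
-- 	return (arr) #returns the made matrix
-- ===== SOURCE B (Python) =====
-- def make_sspm(set, t):
--     # maintain the set of reachable subset sums within the table's column range [0, t],
--     # instead of a cell-by-cell DP recurrence over the previous row
--     reachable = {0}
--     rows = [[j in reachable for j in range(t + 1)]]
--     for x in set:
--         reachable = reachable | {s + x for s in reachable if 0 <= s + x <= t}
--         rows.append([j in reachable for j in range(t + 1)])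
--     return rows
-- ===== Notes on version B (the rewrite author's own statement) =====
-- stated objective: alternative
-- what changed: Instead of filling a (len(set)+1) x (t+1) DP matrix cell by cell from the previous row, B maintains a running set of reachable subset sums within [0, t] and materializes each row as a membership test over range(t+1).
-- outside the precondition, e.g. on make_sspm([-1], 1): A raises IndexError, B returns [[True, False], [True, False]]
import Mathlib
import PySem

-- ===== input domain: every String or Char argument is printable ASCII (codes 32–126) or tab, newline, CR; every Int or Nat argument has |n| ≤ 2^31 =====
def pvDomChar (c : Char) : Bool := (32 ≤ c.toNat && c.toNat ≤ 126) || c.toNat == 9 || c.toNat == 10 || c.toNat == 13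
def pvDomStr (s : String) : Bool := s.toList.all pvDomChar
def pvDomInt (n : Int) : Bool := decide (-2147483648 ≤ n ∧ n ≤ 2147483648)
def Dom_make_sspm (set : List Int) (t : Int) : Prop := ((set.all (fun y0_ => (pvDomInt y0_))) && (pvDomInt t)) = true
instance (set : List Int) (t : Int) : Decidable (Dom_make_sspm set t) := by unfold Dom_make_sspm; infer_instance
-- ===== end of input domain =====

-- B replaces A's cell-by-cell subset-sum DP recurrence by a running set of reachable sums (objective: alternative, same cost).


-- ===== PORT A =====
def make_sspm (set : List Int) (t : Int) : List (List Bool) :=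
  let arr : List (List Bool) :=
    (PySem.List.pyRange 0 (Int.ofNat set.length) 1).map
      (fun _ => (PySem.List.pyRange 0 (t+1) 1).map (fun i => if i ≠ 0 then false else true))
  let arr := PySem.List.insert arr 0
      ((PySem.List.pyRange 0 (t+1) 1).map (fun i => if i ≠ 0 then false else true))
  (PySem.List.pyRange 1 (Int.ofNat arr.length) 1).foldl (fun arr i =>
    (PySem.List.pyRange 1 (Int.ofNat (PySem.List.pyGetD arr i []).length) 1).foldl (fun arr j =>
      let v : Bool :=
        if j - PySem.List.pyGetD set (i-1) 0 ≥ 0 then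
          PySem.List.pyGetD (PySem.List.pyGetD arr (i-1) []) j false
            || PySem.List.pyGetD (PySem.List.pyGetD arr (i-1) [])
                 (j - PySem.List.pyGetD set (i-1) 0) false
        else
          PySem.List.pyGetD (PySem.List.pyGetD arr (i-1) []) j false
      PySem.List.pySetD arr i (PySem.List.pySetD (PySem.List.pyGetD arr i []) j v)) arr) arr

-- ===== PORT B =====
def make_sspm_alt (set : List Int) (t : Int) : List (List Bool) :=
  let reachable : List Int := [0]
  let rows : List (List Bool) := [(PySem.List.pyRange 0 (t+1) 1).map (fun j => reachable.contains j)]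
  (set.foldl (fun (st : List Int × List (List Bool)) x =>
      let r := PySem.Set.union st.1
        (PySem.Set.ofList ((st.1.filter (fun s => 0 ≤ s + x ∧ s + x ≤ t)).map (fun s => s + x)))
      (r, st.2 ++ [(PySem.List.pyRange 0 (t+1) 1).map (fun j => r.contains j)]))
    (reachable, rows)).2


-- ===== PRECONDITION & SPEC =====
-- Pre_ excludes the inputs with t >= 1 and a negative element: there A's lookup arr[i-1][j - set[i-1]] can point
-- beyond column t, so A raises IndexError on most of this region, and the exact raising set is not closed-form (it
-- depends on `or` short-circuiting over the evolving table); on excluded inputs where A does return, B returns the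
-- same table (see the cited example).
def Pre_make_sspm (set : List Int) (t : Int) : Prop := t ≤ 0 ∨ ∀ x ∈ set, 0 ≤ x
instance (set : List Int) (t : Int) : Decidable (Pre_make_sspm set t) := by unfold Pre_make_sspm; infer_instance
def pvWitness_make_sspm : List Int × Int := ([1, 2], 3)

def Spec_make_sspm (set : List Int) (t : Int) (out : List (List Bool)) : Prop := out = make_sspm_alt set t
instance (set : List Int) (t : Int) (out : List (List Bool)) : Decidable (Spec_make_sspm set t out) := by unfold Spec_make_sspm; infer_instance

-- ===== CLAIM (what is proved, stated in full; the proofs are below) =====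
def Claim_equal_make_sspm : Prop := ∀ (set : List Int) (t : Int), Dom_make_sspm set t → Pre_make_sspm set t → Spec_make_sspm set t (make_sspm set t)

-- ===== LEMMAS AND PROOFS =====

def canReach : List Int → Int → Bool
  | [], j => j == 0
  | x :: l, j => canReach l j || canReach l (j - x)

def refRow (pre : List Int) (t : Int) : List Bool :=
  (PySem.List.pyRange 0 (t+1) 1).map (fun j => canReach pre j)

def refTab (set : List Int) (t : Int) : List (List Bool) :=
  (List.range (set.length + 1)).map (fun k => refRow (set.take k) t)

theorem canReach_zero (l : List Int) : canReach l 0 = true := by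
  induction l with
  | nil => rfl
  | cons x l ih => simp [canReach, ih]

theorem canReach_append (l : List Int) (x j : Int) :
    canReach (l ++ [x]) j = (canReach l j || canReach l (j - x)) := by
  induction l generalizing j with
  | nil => rfl
  | cons y l ih =>
      simp only [List.cons_append, canReach, ih]
      rw [sub_right_comm j x y]
      simp [Bool.or_assoc, Bool.or_left_comm]

theorem canReach_neg (l : List Int) (hnn : ∀ x ∈ l, 0 ≤ x) (j : Int) (hj : j < 0) :
    canReach l j = false := by
  induction l generalizing j with
  | nil => simp [canReach]; omega
  | cons x l ih =>
      have hx := hnn x (by simp)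
      simp only [canReach, Bool.or_eq_false_iff]
      exact ⟨ih (fun y hy => hnn y (by simp [hy])) j hj,
             ih (fun y hy => hnn y (by simp [hy])) (j - x) (by omega)⟩

def pvStepR (t : Int) (R : List Int) (x : Int) : List Int :=
  PySem.Set.union R (PySem.Set.ofList ((R.filter (fun s => 0 ≤ s + x ∧ s + x ≤ t)).map (fun s => s + x)))

def pvRL (t : Int) (l : List Int) : List Int := l.foldl (pvStepR t) [0]

def pvRow (t : Int) (R : List Int) : List Bool :=
  (PySem.List.pyRange 0 (t+1) 1).map (fun j => R.contains j)

theorem pvRL_append (t : Int) (l : List Int) (x : Int) :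
    pvRL t (l ++ [x]) = pvStepR t (pvRL t l) x := by
  simp [pvRL, List.foldl_append]

theorem pvRL_spec (t : Int) (l : List Int) (hnn : ∀ x ∈ l, 0 ≤ x) :
    (∀ s ∈ pvRL t l, 0 ≤ s) ∧
    (∀ j : Int, 0 ≤ j → j ≤ t → (j ∈ pvRL t l ↔ canReach l j = true)) := by
  induction l using List.reverseRecOn with
  | nil =>
      constructor
      · intro s hs; simp [pvRL] at hs; omega
      · intro j h0 ht; simp [pvRL, canReach]
  | append_singleton l x ih =>
      have hx : 0 ≤ x := hnn x (by simp)
      have hnn' : ∀ y ∈ l, 0 ≤ y := fun y hy => hnn y (by simp [hy])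
      obtain ⟨ihn, ihm⟩ := ih hnn'
      rw [pvRL_append]
      constructor
      · intro s hs
        rw [pvStepR, PySem.Set.mem_union, PySem.Set.mem_ofList] at hs
        rcases hs with hs | hs
        · exact ihn s hs
        · obtain ⟨a, ha, rfl⟩ := List.mem_map.mp hs
          have := ihn a (List.mem_of_mem_filter ha)
          omega
      · intro j h0 ht
        rw [pvStepR, PySem.Set.mem_union, PySem.Set.mem_ofList, canReach_append,
            Bool.or_eq_true, List.mem_map]
        constructor
        · rintro (hj | ⟨a, ha, rfl⟩)
          · exact Or.inl ((ihm j h0 ht).mp hj)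
          · have haR := List.mem_of_mem_filter ha
            have hle := (List.mem_filter.mp ha).2
            have hle' : a + x ≤ t := by simp at hle; omega
            have h0a := ihn a haR
            refine Or.inr ?_
            have : a = (a + x) - x := by omega
            rw [← this] at *
            exact (by simpa using (ihm a h0a (by omega)).mp haR)
        · rintro (hj | hj)
          · exact Or.inl ((ihm j h0 ht).mpr hj)
          · by_cases hjx : 0 ≤ j - x
            · refine Or.inr ⟨j - x, List.mem_filter.mpr ⟨(ihm (j-x) hjx (by omega)).mpr hj, by simp; omega⟩, by omega⟩
            · rw [canReach_neg l hnn' (j - x) (by omega)] at hj; exact absurd hj (by simp)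

theorem pvRow_eq_refRow (t : Int) (l : List Int) (hnn : ∀ x ∈ l, 0 ≤ x) :
    pvRow t (pvRL t l) = refRow l t := by
  apply List.map_congr_left
  intro j hj
  rw [PySem.List.mem_pyRange_one] at hj
  have := ((pvRL_spec t l hnn).2 j hj.1 (by omega))
  by_cases h : canReach l j = true
  · simp [h, this.mpr h]
  · simp only [Bool.not_eq_true] at h
    rw [h]
    simp only [List.contains_eq_mem, decide_eq_false_iff_not]
    intro hm
    exact absurd (this.mp hm) (by simp [h])

theorem B_eval (t : Int) (l : List Int) :
    (l.foldl (fun (st : List Int × List (List Bool)) x =>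
      let r := PySem.Set.union st.1
        (PySem.Set.ofList ((st.1.filter (fun s => 0 ≤ s + x ∧ s + x ≤ t)).map (fun s => s + x)))
      (r, st.2 ++ [(PySem.List.pyRange 0 (t+1) 1).map (fun j => r.contains j)]))
      ([0], [(PySem.List.pyRange 0 (t+1) 1).map (fun j => List.contains [0] j)]))
    = (pvRL t l, (List.range (l.length + 1)).map (fun k => pvRow t (pvRL t (l.take k)))) := by
  induction l using List.reverseRecOn with
  | nil => simp [pvRL, pvRow]
  | append_singleton l x ih =>
      rw [List.foldl_append, ih]
      simp only [List.foldl_cons, List.foldl_nil, Prod.mk.injEq]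
      have hstep : pvRL t (l ++ [x]) = PySem.Set.union (pvRL t l)
          (PySem.Set.ofList ((List.filter (fun s => decide (0 ≤ s + x ∧ s + x ≤ t)) (pvRL t l)).map (fun s => s + x))) := by
        rw [pvRL_append]; rfl
      refine ⟨hstep.symm, ?_⟩
      rw [List.length_append, List.length_singleton]
      conv_rhs => rw [List.range_succ, List.map_append]
      congr 1
      · apply List.map_congr_left
        intro k hk
        rw [List.mem_range] at hk
        rw [List.take_append_of_le_length (by omega)]
      · simp only [List.map_cons, List.map_nil]
        rw [show l.length + 1 = (l ++ [x]).length by simp, List.take_length, ← hstep]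
        rfl

def pvBase (t : Int) : List Bool :=
  (PySem.List.pyRange 0 (t+1) 1).map (fun i => if i ≠ 0 then false else true)

def pvGv (prev : List Bool) (x j : Int) : Bool :=
  if j - x ≥ 0 then
    PySem.List.pyGetD prev j false || PySem.List.pyGetD prev (j - x) false
  else
    PySem.List.pyGetD prev j false

def pvMix (t : Int) (prev : List Bool) (x b : Int) : List Bool :=
  (PySem.List.pyRange 0 (t+1) 1).map
    (fun j => if 1 ≤ j ∧ j < b then pvGv prev x j else (if j ≠ 0 then false else true))

theorem pvGetD_cast {α : Type} (xs : List α) (k : Nat) (d : α) (h : k < xs.length) :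
    PySem.List.pyGetD xs (k : Int) d = xs[k] := by
  simp [PySem.List.pyGetD_natCast, List.getElem?_eq_getElem h]

theorem pvGetD_set_ne {α : Type} (xs : List α) (p k : Nat) (v : α) (d : α) (hne : p ≠ k) :
    PySem.List.pyGetD (xs.set p v) (k : Int) d = PySem.List.pyGetD xs (k : Int) d := by
  simp [PySem.List.pyGetD_natCast, List.getElem?_set_ne hne]

theorem pvMix_one (t : Int) (prev : List Bool) (x : Int) : pvMix t prev x 1 = pvBase t := by
  apply List.map_congr_left
  intro j _
  rw [if_neg (by omega)]

theorem pvMix_set (t : Int) (prev : List Bool) (x b : Int) (hb1 : 1 ≤ b) (hbt : b ≤ t) :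
    (pvMix t prev x b).set b.toNat (pvGv prev x b) = pvMix t prev x (b+1) := by
  apply List.ext_getElem
  · simp [pvMix]
  · intro k h1 h2
    have hk : (k:Int) < t + 1 := by
      simp only [pvMix, List.length_map, PySem.List.length_pyRange_one] at h2
      omega
    simp only [pvMix, List.getElem_set, List.getElem_map, PySem.List.getElem_pyRange_one]
    by_cases hkb : b.toNat = k
    · rw [if_pos hkb]
      have hbk : (0:Int) + (k:Int) = b := by omega
      rw [hbk, if_pos ⟨hb1, by omega⟩]
    · rw [if_neg hkb]
      split_ifs with h1 h2 h2 <;> first | rfl | (exfalso; omega)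

theorem pvMix_full (t : Int) (pre : List Int) (x : Int) (hnn : ∀ y ∈ pre, 0 ≤ y) (hx : 0 ≤ x) :
    pvMix t (refRow pre t) x (t+1) = refRow (pre ++ [x]) t := by
  apply List.map_congr_left
  intro j hj
  rw [PySem.List.mem_pyRange_one] at hj
  obtain ⟨h0, hlt⟩ := hj
  by_cases hj1 : 1 ≤ j
  · rw [if_pos ⟨hj1, hlt⟩, canReach_append]
    have hpj : PySem.List.pyGetD (refRow pre t) j false = canReach pre j := by
      rw [refRow, PySem.List.pyGetD_map_pyRange_of_nonneg _ _ _ _ h0 hlt]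
    by_cases hjx : j - x ≥ 0
    · rw [pvGv, if_pos hjx, hpj, refRow,
        PySem.List.pyGetD_map_pyRange_of_nonneg _ _ _ _ hjx (by omega)]
    · rw [pvGv, if_neg hjx, hpj, canReach_neg pre hnn (j - x) (by omega), Bool.or_false]
  · have hj0 : j = 0 := by omega
    rw [if_neg (by omega), hj0]
    simp [canReach_zero]

theorem inner_fold (set : List Int) (t : Int) (p : Nat) (i : Int) (hi : i = (p : Int)) (hp1 : 1 ≤ p)
    (arr : List (List Bool)) (hp : p < arr.length)
    (prev : List Bool) (hprev : PySem.List.pyGetD arr ((p : Int) - 1) [] = prev)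
    (x : Int) (hx : PySem.List.pyGetD set ((p : Int) - 1) 0 = x)
    (hbase : arr[p] = pvBase t) :
    ∀ b : Int, 1 ≤ b → b ≤ t + 1 →
    (PySem.List.pyRange 1 b 1).foldl (fun arr j =>
      let v : Bool :=
        if j - PySem.List.pyGetD set (i-1) 0 ≥ 0 then
          PySem.List.pyGetD (PySem.List.pyGetD arr (i-1) []) j false
            || PySem.List.pyGetD (PySem.List.pyGetD arr (i-1) [])
                 (j - PySem.List.pyGetD set (i-1) 0) false
        else
          PySem.List.pyGetD (PySem.List.pyGetD arr (i-1) []) j false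
      PySem.List.pySetD arr i (PySem.List.pySetD (PySem.List.pyGetD arr i []) j v)) arr
    = arr.set p (pvMix t prev x b) := by
  subst hi
  intro b hb
  induction b, hb using Int.le_induction with
  | base =>
      intro _
      rw [PySem.List.pyRange_one_eq_nil (le_refl 1), List.foldl_nil, pvMix_one, ← hbase,
        List.set_getElem_self]
  | succ b hb1 ih =>
      intro hbt
      rw [PySem.List.pyRange_one_succ_right (by omega), List.foldl_append, ih (by omega),
        List.foldl_cons, List.foldl_nil]
      have hcast : (p : Int) - 1 = ((p - 1 : Nat) : Int) := by push_cast [hp1]; omega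
      have hne : p ≠ p - 1 := by omega
      have h1 : PySem.List.pyGetD (arr.set p (pvMix t prev x b)) ((p:Int) - 1) [] = prev := by
        rw [hcast] at hprev ⊢
        rw [pvGetD_set_ne _ _ _ _ _ hne, hprev]
      have h3 : PySem.List.pyGetD (arr.set p (pvMix t prev x b)) ((p:Int)) [] = pvMix t prev x b := by
        rw [pvGetD_cast _ _ _ (by simpa using hp), List.getElem_set_self]
      rw [h1, h3, hx]
      show PySem.List.pySetD _ _ (PySem.List.pySetD (pvMix t prev x b) b (pvGv prev x b)) = _
      rw [PySem.List.pySetD_of_nonneg _ _ (by omega : (0:Int) ≤ b),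
          pvMix_set t prev x b hb1 (by omega),
          PySem.List.pySetD_of_nonneg _ _ (by omega : (0:Int) ≤ (p:Int)),
          Int.toNat_natCast, List.set_set]

theorem pvBase_eq_refRow_nil (t : Int) : pvBase t = refRow [] t := by
  apply List.map_congr_left
  intro j _
  by_cases h : j = 0 <;> simp [h, canReach]

theorem outer_fold (set : List Int) (t : Int) (hnn : ∀ x ∈ set, 0 ≤ x) (ht : 0 < t) :
    ∀ m : Nat, m ≤ set.length →
    (PySem.List.pyRange 1 ((m : Int) + 1) 1).foldl (fun arr i =>
      (PySem.List.pyRange 1 (Int.ofNat (PySem.List.pyGetD arr i []).length) 1).foldl (fun arr j =>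
        let v : Bool :=
          if j - PySem.List.pyGetD set (i-1) 0 ≥ 0 then
            PySem.List.pyGetD (PySem.List.pyGetD arr (i-1) []) j false
              || PySem.List.pyGetD (PySem.List.pyGetD arr (i-1) [])
                   (j - PySem.List.pyGetD set (i-1) 0) false
          else
            PySem.List.pyGetD (PySem.List.pyGetD arr (i-1) []) j false
        PySem.List.pySetD arr i (PySem.List.pySetD (PySem.List.pyGetD arr i []) j v)) arr)
      (pvBase t :: List.replicate set.length (pvBase t))
    = (List.range (m+1)).map (fun k => refRow (set.take k) t)
        ++ List.replicate (set.length - m) (pvBase t) := by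
  intro m
  induction m with
  | zero =>
      intro _
      rw [PySem.List.pyRange_one_eq_nil (by omega), List.foldl_nil]
      simp [pvBase_eq_refRow_nil]
  | succ m ih =>
      intro hm
      have hcast : ((m + 1 : Nat) : Int) + 1 = ((m : Int) + 1) + 1 := by push_cast; ring
      rw [hcast, PySem.List.pyRange_one_succ_right (by omega), List.foldl_append, ih (by omega),
        List.foldl_cons, List.foldl_nil]
      set n := set.length with hn
      set pref := (List.range (m+1)).map (fun k => refRow (set.take k) t) with hpref
      have hpreflen : pref.length = m + 1 := by simp [hpref]
      have harrlen : (pref ++ List.replicate (n - m) (pvBase t)).length = n + 1 := by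
        simp [hpreflen]; omega
      have hgetbase : (pref ++ List.replicate (n - m) (pvBase t))[m+1]'(by omega) = pvBase t := by
        rw [List.getElem_append_right (by omega)]
        exact List.getElem_replicate ..
      have hget : PySem.List.pyGetD (pref ++ List.replicate (n - m) (pvBase t)) ((m:Int)+1) [] = pvBase t := by
        rw [show ((m:Int)+1) = ((m+1 : Nat) : Int) by push_cast; ring,
          pvGetD_cast _ _ _ (by omega), hgetbase]
      rw [hget]
      have hbound : Int.ofNat (pvBase t).length = t + 1 := by
        simp only [pvBase, List.length_map, PySem.List.length_pyRange_one, Int.sub_zero]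
        simp [Int.toNat_of_nonneg (by omega : (0:Int) ≤ t + 1)]
      rw [hbound]
      have hprev : PySem.List.pyGetD (pref ++ List.replicate (n - m) (pvBase t)) (((m+1:Nat):Int) - 1) []
          = refRow (set.take m) t := by
        rw [show (((m+1:Nat):Int) - 1) = ((m:Nat):Int) by push_cast; ring,
          pvGetD_cast _ _ _ (by omega)]
        rw [List.getElem_append_left (by omega)]
        simp [hpref]
      have hxv : PySem.List.pyGetD set (((m+1:Nat):Int) - 1) 0 = set[m]'(by omega) := by
        rw [show (((m+1:Nat):Int) - 1) = ((m:Nat):Int) by push_cast; ring,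
          pvGetD_cast _ _ _ (by omega)]
      have := inner_fold set t (m+1) ((m:Int)+1) (by push_cast; ring) (by omega)
        (pref ++ List.replicate (n - m) (pvBase t)) (by omega)
        (refRow (set.take m) t) (by rw [show ((m+1:Nat):Int) = (m:Int)+1 by push_cast; ring] at hprev; exact hprev)
        (set[m]'(by omega)) (by rw [show ((m+1:Nat):Int) = (m:Int)+1 by push_cast; ring] at hxv; exact hxv)
        hgetbase (t+1) (by omega) (le_refl _)
      rw [this]
      rw [pvMix_full t (set.take m) _ (fun y hy => hnn y (List.mem_of_mem_take hy)) (hnn _ (List.getElem_mem _))]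
      have htake : set.take m ++ [set[m]'(by omega)] = set.take (m+1) := by
        rw [List.take_add_one, List.getElem?_eq_getElem (by omega)]
        rfl
      rw [htake]
      rw [show n - m = (n - (m+1)) + 1 by omega, List.replicate_succ,
        ← hpreflen, List.set_append_right _ _ (Nat.le_refl _)]
      simp only [Nat.sub_self, List.set_cons_zero]
      rw [hpreflen]
      conv_rhs => rw [List.range_succ, List.map_append]
      rw [← hpref]
      simp

theorem pvGetD_mem_or_default {α : Type} (xs : List α) (i : Int) (d : α) :
    PySem.List.pyGetD xs i d = d ∨ PySem.List.pyGetD xs i d ∈ xs := by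
  by_cases h : PySem.Raise.InRange xs.length i
  · exact Or.inr (PySem.List.pyGetD_mem xs d h)
  · exact Or.inl (PySem.List.pyGetD_of_none xs i d ((PySem.List.pyGet?_eq_none_iff xs i).mpr h))

theorem fold_id (set : List Int) (t : Int) (ht : t ≤ 0) :
    ∀ (l : List Int) (arr : List (List Bool)), (∀ r ∈ arr, r = pvBase t) →
    l.foldl (fun arr i =>
      (PySem.List.pyRange 1 (Int.ofNat (PySem.List.pyGetD arr i []).length) 1).foldl (fun arr j =>
        let v : Bool :=
          if j - PySem.List.pyGetD set (i-1) 0 ≥ 0 then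
            PySem.List.pyGetD (PySem.List.pyGetD arr (i-1) []) j false
              || PySem.List.pyGetD (PySem.List.pyGetD arr (i-1) [])
                   (j - PySem.List.pyGetD set (i-1) 0) false
          else
            PySem.List.pyGetD (PySem.List.pyGetD arr (i-1) []) j false
        PySem.List.pySetD arr i (PySem.List.pySetD (PySem.List.pyGetD arr i []) j v)) arr) arr
    = arr := by
  intro l
  induction l with
  | nil => intro arr _; rfl
  | cons a l ih =>
      intro arr harr
      rw [List.foldl_cons]
      have hlen : Int.ofNat (PySem.List.pyGetD arr a []).length ≤ 1 := by
        rcases pvGetD_mem_or_default arr a [] with h | h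
        · rw [h]; simp
        · rw [harr _ h]
          simp only [pvBase, List.length_map, PySem.List.length_pyRange_one, Int.sub_zero]
          rw [show Int.ofNat (t+1).toNat = (((t+1).toNat : Nat) : Int) from rfl]
          omega
      rw [PySem.List.pyRange_one_eq_nil hlen, List.foldl_nil]
      exact ih arr harr

theorem zero_mem_pvRL (t : Int) (l : List Int) : (0 : Int) ∈ pvRL t l := by
  induction l using List.reverseRecOn with
  | nil => simp [pvRL]
  | append_singleton l x ih =>
      rw [pvRL_append, pvStepR, PySem.Set.mem_union]
      exact Or.inl ih

theorem pvRow_nonpos (t : Int) (ht : t ≤ 0) (R : List Int) (h0 : (0:Int) ∈ R) :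
    pvRow t R = pvBase t := by
  apply List.map_congr_left
  intro j hj
  rw [PySem.List.mem_pyRange_one] at hj
  have hj0 : j = 0 := by omega
  subst hj0
  simp [List.contains_eq_mem, h0]

theorem pvInit_eq (set : List Int) (t : Int) :
    PySem.List.insert ((PySem.List.pyRange 0 (Int.ofNat set.length) 1).map
      (fun _ => (PySem.List.pyRange 0 (t+1) 1).map (fun i => if i ≠ 0 then false else true))) 0
      ((PySem.List.pyRange 0 (t+1) 1).map (fun i => if i ≠ 0 then false else true))
    = pvBase t :: List.replicate set.length (pvBase t) := by
  rw [PySem.List.insert_zero]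
  congr 1
  rw [show ((PySem.List.pyRange 0 (t+1) 1).map (fun i => if i ≠ 0 then false else true)) = pvBase t from rfl,
    List.map_const']
  congr 1
  simp [PySem.List.length_pyRange_one]

theorem A_main (set : List Int) (t : Int) (hnn : ∀ x ∈ set, 0 ≤ x) (ht : 0 < t) :
    make_sspm set t = refTab set t := by
  simp only [make_sspm]
  rw [pvInit_eq]
  rw [show Int.ofNat (pvBase t :: List.replicate set.length (pvBase t)).length
      = ((set.length : Int) + 1) by simp]
  rw [outer_fold set t hnn ht set.length (le_refl _)]
  simp [refTab]

theorem A_nonpos (set : List Int) (t : Int) (ht : t ≤ 0) :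
    make_sspm set t = List.replicate (set.length + 1) (pvBase t) := by
  simp only [make_sspm]
  rw [pvInit_eq]
  rw [fold_id set t ht _ _ (by
    intro r hr
    rcases List.mem_cons.mp hr with h | h
    · exact h
    · exact List.eq_of_mem_replicate h)]
  rw [List.replicate_succ]

theorem B_main (set : List Int) (t : Int) (hnn : ∀ x ∈ set, 0 ≤ x) :
    make_sspm_alt set t = refTab set t := by
  simp only [make_sspm_alt]
  rw [B_eval]
  apply List.map_congr_left
  intro k hk
  exact pvRow_eq_refRow t (set.take k) (fun y hy => hnn y (List.mem_of_mem_take hy))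

theorem B_nonpos (set : List Int) (t : Int) (ht : t ≤ 0) :
    make_sspm_alt set t = List.replicate (set.length + 1) (pvBase t) := by
  simp only [make_sspm_alt]
  rw [B_eval]
  rw [show (fun k => pvRow t (pvRL t (set.take k))) = (fun _ : Nat => pvBase t) from
    funext (fun k => pvRow_nonpos t ht _ (zero_mem_pvRL t _)),
    List.map_const', List.length_range]

theorem final (set : List Int) (t : Int) (hpre : t ≤ 0 ∨ ∀ x ∈ set, 0 ≤ x) :
    make_sspm set t = make_sspm_alt set t := by
  by_cases ht : t ≤ 0
  · rw [A_nonpos set t ht, B_nonpos set t ht]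
  · have hnn : ∀ x ∈ set, 0 ≤ x := by
      rcases hpre with h | h
      · omega
      · exact h
    rw [A_main set t hnn (by omega), B_main set t hnn]

-- ===== VERDICT (by name: the statement is the Claim_ definition above) =====
theorem make_sspm_spec : Claim_equal_make_sspm := by
  intro set t _ hpre
  unfold Spec_make_sspm
  exact final set t hpre
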